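-- pv_equiv track=rewrite | github.com/prabhatjha8/LeetCode | 2716-prime-subtraction-operation/prime-subtraction-operation.py | generate_prime_list
-- ===== SOURCE A (Python) =====
-- def generate_prime_list(n):
--   ansList = [1 for _ in range(n+1)]
--   ansList[0] = 0
--   ansList[1] = 0
--   i = 0
--   while i < n+1:
--     if ansList[i] == 0:
--       i += 1
--     else:
--       for j in range(i+1, n+1):
--           if j%i == 0:
--               ansList[j] = 0
--       i += 1
--
--   return ansList
-- ===== SOURCE B (Python) =====
-- def generate_prime_list(n):
--     # Sieve kept as a set of composites (marked from i*i, stepping by i);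
--     # the 0/1 answer list is produced afterwards by a single comprehension.
--     comp = set()
--     for i in range(2, n + 1):
--         if i not in comp:
--             comp.update(range(i * i, n + 1, i))
--     return [1 if j >= 2 and j not in comp else 0 for j in range(n + 1)]
-- ===== Notes on version B (the rewrite author's own statement) =====
-- stated objective: faster
-- what changed: Replaced A's in-place 0/1 array with a modulo-scan of every j in (i, n] by a sieve that accumulates a set of composites (marking multiples of each unmarked i from i*i stepping by i) and then produces the 0/1 list in one final comprehension instead of mutating it.
import Mathlib
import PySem

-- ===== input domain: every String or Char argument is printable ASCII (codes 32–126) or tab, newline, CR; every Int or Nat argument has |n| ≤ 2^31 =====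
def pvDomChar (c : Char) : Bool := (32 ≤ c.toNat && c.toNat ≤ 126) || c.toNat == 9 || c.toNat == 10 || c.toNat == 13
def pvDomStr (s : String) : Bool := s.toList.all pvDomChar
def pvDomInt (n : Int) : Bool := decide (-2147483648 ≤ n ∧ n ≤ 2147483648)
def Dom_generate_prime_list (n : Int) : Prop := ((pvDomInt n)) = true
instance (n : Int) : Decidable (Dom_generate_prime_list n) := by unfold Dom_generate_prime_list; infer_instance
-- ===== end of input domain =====

-- B replaces A's mutated 0/1 array and modulo-scan of every j in (i, n] by a sieve that
-- collects a SET of composites (multiples of each unmarked i from i*i, stepping by i) and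
-- emits the 0/1 list afterwards in one comprehension (objective: faster).

-- ===== PORT A =====
def generate_prime_list (n : Int) : List Int :=
  let ansList := (PySem.List.pyRange 0 (n+1) 1).map (fun _ => (1 : Int))
  let ansList := PySem.List.pySetD ansList 0 0
  let ansList := PySem.List.pySetD ansList 1 0
  -- while i < n+1, i incremented by 1 in both branches: fold over range(0, n+1)
  (PySem.List.pyRange 0 (n+1) 1).foldl (fun ansList i =>
    if PySem.List.pyGetD ansList i 0 = 0 then ansList
    else (PySem.List.pyRange (i+1) (n+1) 1).foldl
      (fun ansList j =>
        if PySem.Int.mod j i = 0 then PySem.List.pySetD ansList j 0 else ansList)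
      ansList) ansList

-- ===== PORT B =====
def generate_prime_list_alt (n : Int) : List Int :=
  let comp : PySem.Set Int :=
    (PySem.List.pyRange 2 (n+1) 1).foldl (fun comp i =>
      if PySem.Set.contains comp i = false then
        PySem.Set.update comp (PySem.List.pyRange (i*i) (n+1) i)
      else comp) PySem.Set.empty
  (PySem.List.pyRange 0 (n+1) 1).map (fun j =>
    if 2 ≤ j ∧ PySem.Set.contains comp j = false then 1 else 0)

-- ===== PRECONDITION & SPEC =====
-- Pre_ excludes exactly the nonpositive n, on which A raises IndexError while clearing the first two cells of its answer list.
def Pre_generate_prime_list (n : Int) : Prop := 1 ≤ n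
instance (n : Int) : Decidable (Pre_generate_prime_list n) := by unfold Pre_generate_prime_list; infer_instance
def pvWitness_generate_prime_list : Int := 5
def Spec_generate_prime_list (n : Int) (out : List Int) : Prop := out = generate_prime_list_alt n
instance (n : Int) (out : List Int) : Decidable (Spec_generate_prime_list n out) := by unfold Spec_generate_prime_list; infer_instance

-- ===== CLAIM (what is proved, stated in full; the proofs are below) =====
def Claim_equal_generate_prime_list : Prop := ∀ (n : Int), Dom_generate_prime_list n → Pre_generate_prime_list n → Spec_generate_prime_list n (generate_prime_list n)

-- ===== LEMMAS AND PROOFS =====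

-- A-side invariant: after A has processed the i's below k, cell j is 0 iff j < 2 or Marked k j
def Marked (k j : Int) : Prop := ∃ d, 2 ≤ d ∧ d < k ∧ d < j ∧ d ∣ j

-- Boolean form of Marked, used inside the reference entry's if
def markedB (k j : Int) : Bool := (PySem.List.pyRange 2 (min k j) 1).any (fun d => PySem.Int.mod j d == 0)

-- B-side invariant: after B has processed the i's below k, x is in the composite set iff InComp n k x
def InComp (n k x : Int) : Prop := ∃ d, 2 ≤ d ∧ d < k ∧ d*d ≤ x ∧ x ≤ n ∧ d ∣ x

-- the value A's cell j holds after processing the i's below k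
def refEntry (k j : Int) : Int := if 2 ≤ j ∧ markedB k j = false then 1 else 0

def refList (n k : Int) : List Int := (PySem.List.pyRange 0 (n+1) 1).map (refEntry k)

lemma markedB_iff (k j : Int) : markedB k j = true ↔ Marked k j := by
  simp only [markedB, Marked, List.any_eq_true, PySem.List.mem_pyRange_one, beq_iff_eq,
    PySem.Int.mod_eq_zero_iff_dvd, lt_min_iff]
  constructor
  · rintro ⟨d, ⟨h2, hk, hj⟩, hd⟩; exact ⟨d, h2, hk, hj, hd⟩
  · rintro ⟨d, h2, hk, hj, hd⟩; exact ⟨d, ⟨h2, hk, hj⟩, hd⟩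

lemma length_refList (n k : Int) : (refList n k).length = (n+1).toNat := by
  simp [refList, PySem.List.length_pyRange_one]

lemma pyGetD_refList (n k j : Int) (h0 : 0 ≤ j) (h1 : j < n+1) :
    PySem.List.pyGetD (refList n k) j 0 = refEntry k j :=
  PySem.List.pyGetD_map_pyRange_of_nonneg _ _ _ _ h0 h1

lemma Marked_succ_of_marked (k j : Int) (hkk : Marked k k) : Marked (k+1) j ↔ Marked k j := by
  constructor
  · rintro ⟨d, h2, hk1, hj, hd⟩
    by_cases hdk : d < k
    · exact ⟨d, h2, hdk, hj, hd⟩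
    · have hdk' : d = k := by omega
      subst hdk'
      obtain ⟨e, he2, hek, _, hed⟩ := hkk
      exact ⟨e, he2, hek, by omega, hed.trans hd⟩
  · rintro ⟨d, h2, hk1, hj, hd⟩; exact ⟨d, h2, by omega, hj, hd⟩

lemma Marked_succ (k j : Int) (h2 : 2 ≤ k) : Marked (k+1) j ↔ Marked k j ∨ (k < j ∧ k ∣ j) := by
  constructor
  · rintro ⟨d, hd2, hk1, hj, hd⟩
    by_cases hdk : d < k
    · exact Or.inl ⟨d, hd2, hdk, hj, hd⟩
    · have : d = k := by omega
      subst this; exact Or.inr ⟨hj, hd⟩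
  · rintro (⟨d, hd2, hk1, hj, hd⟩ | ⟨hj, hd⟩)
    · exact ⟨d, hd2, by omega, hj, hd⟩
    · exact ⟨k, h2, by omega, hj, hd⟩
lemma markSet (ms : List Int) :
    ∀ (L : List Int), (∀ m ∈ ms, 0 ≤ m ∧ m < (L.length : Int)) →
    ((ms.foldl (fun L j => PySem.List.pySetD L j 0) L).length = L.length ∧
     ∀ j : Nat, PySem.List.pyGetD (ms.foldl (fun L j => PySem.List.pySetD L j 0) L) (j : Int) 0
       = if (j : Int) ∈ ms then 0 else PySem.List.pyGetD L (j : Int) 0) := by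
  induction ms with
  | nil => intro L _; simp
  | cons m ms ih =>
    intro L hms
    obtain ⟨hm0, hmlen⟩ := hms m (by simp)
    have hmn : m = ((m.toNat : Nat) : Int) := by omega
    have hlen : (PySem.List.pySetD L m 0).length = L.length := by
      simp [PySem.List.length_pySetD]
    simp only [List.foldl_cons]
    obtain ⟨ihl, ihg⟩ := ih (PySem.List.pySetD L m 0)
      (fun x hx => by rw [hlen]; exact hms x (by simp [hx]))
    refine ⟨by rw [ihl, hlen], fun j => ?_⟩
    rw [ihg j]
    rw [hmn, PySem.List.pyGetD_pySetD_natCast _ _ _ _ _ (by omega)]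
    simp only [List.mem_cons]
    by_cases h1 : (j : Int) ∈ ms
    · rw [if_pos h1, if_pos (Or.inr h1)]
    · by_cases h2 : (j : Int) = ((m.toNat : Nat) : Int)
      · rw [if_neg h1, if_pos (show j = m.toNat by exact_mod_cast h2), if_pos (Or.inl h2)]
      · rw [if_neg h1, if_neg (fun h => h2 (by exact_mod_cast h)), if_neg (by tauto)]

lemma stepA (n k : Int) (hn : 1 ≤ n) (h2 : 2 ≤ k) (hk : k ≤ n) :
    (if PySem.List.pyGetD (refList n k) k 0 = 0 then refList n k
     else (PySem.List.pyRange (k+1) (n+1) 1).foldl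
       (fun L j => if PySem.Int.mod j k = 0 then PySem.List.pySetD L j 0 else L)
       (refList n k)) = refList n (k+1) := by
  rw [pyGetD_refList n k k (by omega) (by omega)]
  by_cases hM : markedB k k = true
  · have hE : refEntry k k = 0 := by simp [refEntry, hM]
    rw [hE, if_pos rfl]
    unfold refList
    apply List.map_congr_left
    intro j _
    have : markedB (k+1) j = markedB k j := by
      rw [Bool.eq_iff_iff, markedB_iff, markedB_iff]
      exact Marked_succ_of_marked k j ((markedB_iff k k).1 hM)
    simp [refEntry, this]
  · have hE : refEntry k k = 1 := by
      simp [refEntry, h2, Bool.eq_false_iff.2 hM]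
    rw [hE, if_neg (by norm_num)]
    rw [PySem.List.foldl_ite_eq_foldl_filter (p := fun j => PySem.Int.mod j k = 0)]
    set ms := (PySem.List.pyRange (k+1) (n+1) 1).filter (fun j => decide (PySem.Int.mod j k = 0)) with hms_def
    have hmem : ∀ x : Int, x ∈ ms ↔ (k < x ∧ x < n+1 ∧ k ∣ x) := by
      intro x
      simp only [hms_def, List.mem_filter, PySem.List.mem_pyRange_one, decide_eq_true_eq,
        PySem.Int.mod_eq_zero_iff_dvd]
      exact ⟨fun ⟨⟨a, b⟩, c⟩ => ⟨by omega, b, c⟩, fun ⟨a, b, c⟩ => ⟨⟨by omega, b⟩, c⟩⟩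
    have hms : ∀ m ∈ ms, 0 ≤ m ∧ m < ((refList n k).length : Int) := by
      intro m hm
      rw [length_refList]
      have := (hmem m).1 hm
      omega
    obtain ⟨hlen, hget⟩ := markSet ms (refList n k) hms
    apply List.ext_getElem
    · rw [hlen, length_refList, length_refList]
    · intro i hi1 hi2
      rw [hlen, length_refList] at hi1
      have hi : (i : Int) < n + 1 := by omega
      rw [← PySem.List.pyGetD_ofNat _ i 0 (by rwa [hlen, length_refList]),
          ← PySem.List.pyGetD_ofNat _ i 0 (by rwa [length_refList]),
          hget i, pyGetD_refList n (k+1) i (by omega) hi]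
      by_cases hin : (i : Int) ∈ ms
      · rw [if_pos hin]
        obtain ⟨ha, hb, hc⟩ := (hmem i).1 hin
        have : Marked (k+1) i := ⟨k, h2, by omega, ha, hc⟩
        simp [refEntry, (markedB_iff (k+1) i).2 this]
      · rw [if_neg hin, pyGetD_refList n k i (by omega) hi]
        have : markedB (k+1) (i : Int) = markedB k i := by
          rw [Bool.eq_iff_iff, markedB_iff, markedB_iff, Marked_succ _ _ h2]
          have hni := (hmem i).not.1 hin
          constructor
          · rintro (h | h)
            · exact h
            · exact absurd ⟨h.1, hi, h.2⟩ hni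
          · exact Or.inl
        simp [refEntry, this]

lemma A_inv (n : Int) (hn : 1 ≤ n) (k : Int) (h2 : 2 ≤ k) :
    k ≤ n+1 →
    (PySem.List.pyRange 2 k 1).foldl (fun L i =>
      if PySem.List.pyGetD L i 0 = 0 then L
      else (PySem.List.pyRange (i+1) (n+1) 1).foldl
        (fun L j => if PySem.Int.mod j i = 0 then PySem.List.pySetD L j 0 else L) L)
      (refList n 2) = refList n k := by
  induction k, h2 using Int.le_induction with
  | base => intro _; rw [PySem.List.pyRange_one_eq_nil (le_refl 2)]; rfl
  | succ k hk2 ih =>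
    intro hk1
    rw [PySem.List.pyRange_one_succ_right (by omega : (2:Int) ≤ k), List.foldl_append,
      ih (by omega)]
    simp only [List.foldl_cons, List.foldl_nil]
    exact stepA n k hn hk2 (by omega)

lemma markedB_two (j : Int) : markedB 2 j = false := by
  simp [markedB, PySem.List.pyRange_one_eq_nil (by omega : min 2 j ≤ 2)]

lemma init_eq (n : Int) :
    PySem.List.pySetD (PySem.List.pySetD
      ((PySem.List.pyRange 0 (n+1) 1).map (fun _ => (1:Int))) 0 0) 1 0 = refList n 2 := by
  rw [PySem.List.pySetD_of_nonneg _ _ (by norm_num), PySem.List.pySetD_of_nonneg _ _ (by norm_num)]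
  apply List.ext_getElem
  · simp [length_refList, PySem.List.length_pyRange_one]
  · intro i h1 h2
    have hlen : i < (n+1).toNat := by
      simpa [PySem.List.length_pyRange_one] using h1
    rw [List.getElem_set, List.getElem_set, List.getElem_map]
    have hr : (refList n 2)[i] = refEntry 2 ((PySem.List.pyRange 0 (n+1) 1)[i]'(by
        simpa [PySem.List.length_pyRange_one] using hlen)) := by
      simp [refList]
    rw [hr]
    simp [refEntry, markedB_two]
    split_ifs <;> omega

lemma mem_pyRange_sq (n k x : Int) (h2 : 2 ≤ k) :
    x ∈ PySem.List.pyRange (k*k) (n+1) k ↔ k*k ≤ x ∧ x < n+1 ∧ k ∣ x := by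
  rw [PySem.List.mem_pyRange_iff_of_pos (by omega : (0:Int) < k)]
  constructor
  · rintro ⟨ha, hb, hc⟩
    exact ⟨ha, hb, by have := dvd_add hc (dvd_mul_right k k); simpa using this⟩
  · rintro ⟨ha, hb, hc⟩
    exact ⟨ha, hb, by have := dvd_sub hc (dvd_mul_right k k); simpa using this⟩

lemma InComp_succ_of_mem (n k x : Int) (hk2 : 2 ≤ k) (hkk : InComp n k k) :
    InComp n (k+1) x ↔ InComp n k x := by
  constructor
  · rintro ⟨d, h2, hk, hsq, hxn, hd⟩
    by_cases hdk : d < k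
    · exact ⟨d, h2, hdk, hsq, hxn, hd⟩
    · have : d = k := by omega
      subst this
      obtain ⟨e, he2, hek, hesq, _, hed⟩ := hkk
      refine ⟨e, he2, hek, ?_, hxn, hed.trans hd⟩
      nlinarith
  · rintro ⟨d, h2, hk, hsq, hxn, hd⟩; exact ⟨d, h2, by omega, hsq, hxn, hd⟩

lemma InComp_succ (n k x : Int) (hk2 : 2 ≤ k) :
    InComp n (k+1) x ↔ InComp n k x ∨ (k*k ≤ x ∧ x ≤ n ∧ k ∣ x) := by
  constructor
  · rintro ⟨d, h2, hk, hsq, hxn, hd⟩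
    by_cases hdk : d < k
    · exact Or.inl ⟨d, h2, hdk, hsq, hxn, hd⟩
    · have : d = k := by omega
      subst this; exact Or.inr ⟨hsq, hxn, hd⟩
  · rintro (⟨d, h2, hk, hsq, hxn, hd⟩ | ⟨hsq, hxn, hd⟩)
    · exact ⟨d, h2, by omega, hsq, hxn, hd⟩
    · exact ⟨k, hk2, by omega, hsq, hxn, hd⟩

lemma B_inv (n : Int) (k : Int) (h2 : 2 ≤ k) : k ≤ n+1 → ∀ x : Int,
    (x ∈ (PySem.List.pyRange 2 k 1).foldl (fun comp i =>
       if PySem.Set.contains comp i = false then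
         PySem.Set.update comp (PySem.List.pyRange (i*i) (n+1) i)
       else comp) PySem.Set.empty) ↔ InComp n k x := by
  induction k, h2 using Int.le_induction with
  | base =>
    intro _ x
    rw [PySem.List.pyRange_one_eq_nil (le_refl 2)]
    simp only [List.foldl_nil]
    constructor
    · intro h; exact absurd h (List.not_mem_nil)
    · rintro ⟨d, hd2, hdk, -⟩; omega
  | succ k hk2 ih =>
    intro hk1 x
    rw [PySem.List.pyRange_one_succ_right (by omega : (2:Int) ≤ k), List.foldl_append]
    simp only [List.foldl_cons, List.foldl_nil]
    have ihx := ih (by omega)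
    by_cases hc : PySem.Set.contains
        ((PySem.List.pyRange 2 k 1).foldl (fun comp i =>
          if PySem.Set.contains comp i = false then
            PySem.Set.update comp (PySem.List.pyRange (i*i) (n+1) i)
          else comp) PySem.Set.empty) k = false
    · rw [if_pos hc, PySem.Set.mem_update, ihx x, mem_pyRange_sq n k x hk2,
        InComp_succ n k x hk2]
      constructor
      · rintro (h | ⟨ha, hb, hd⟩)
        · exact Or.inl h
        · exact Or.inr ⟨ha, by omega, hd⟩
      · rintro (h | ⟨ha, hb, hd⟩)
        · exact Or.inl h
        · exact Or.inr ⟨ha, by omega, hd⟩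
    · rw [if_neg hc]
      have hkmem : InComp n k k := by
        rw [← ihx k, ← PySem.Set.contains_iff]
        revert hc
        cases PySem.Set.contains _ k <;> simp
      rw [ihx x, InComp_succ_of_mem n k x hk2 hkmem]

lemma Marked_iff_InComp (n j : Int) (h0 : 0 ≤ j) (hj : j ≤ n) :
    Marked (n+1) j ↔ InComp n (n+1) j := by
  constructor
  · rintro ⟨d, h2, hk, hdj, hd⟩
    obtain ⟨e, rfl⟩ := hd
    have he2 : 2 ≤ e := by nlinarith
    rcases le_total d e with h | h
    · exact ⟨d, h2, hk, by nlinarith, hj, dvd_mul_right d e⟩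
    · exact ⟨e, he2, by omega, by nlinarith, hj, dvd_mul_left e d⟩
  · rintro ⟨d, h2, hk, hsq, hxn, hd⟩
    exact ⟨d, h2, hk, by nlinarith, hd⟩

lemma a_eq (n : Int) (hn : 1 ≤ n) : generate_prime_list n = refList n (n+1) := by
  simp only [generate_prime_list]
  rw [init_eq n]
  have h0 : PySem.List.pyGetD (refList n 2) 0 0 = 0 := by
    rw [pyGetD_refList n 2 0 (by omega) (by omega)]
    norm_num [refEntry]
  have h1 : PySem.List.pyGetD (refList n 2) 1 0 = 0 := by
    rw [pyGetD_refList n 2 1 (by omega) (by omega)]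
    norm_num [refEntry]
  rw [PySem.List.pyRange_one_cons (by omega : (0:Int) < n+1)]
  rw [show (0:Int)+1 = 1 by norm_num]
  rw [PySem.List.pyRange_one_cons (by omega : (1:Int) < n+1)]
  rw [show (1:Int)+1 = 2 by norm_num]
  simp only [List.foldl_cons]
  rw [if_pos h0, if_pos h1]
  exact A_inv n hn (n+1) (by omega) (le_refl _)

lemma b_eq (n : Int) (hn : 1 ≤ n) : generate_prime_list_alt n = refList n (n+1) := by
  simp only [generate_prime_list_alt, refList]
  apply List.map_congr_left
  intro j hj
  obtain ⟨hj0, hj1⟩ := PySem.List.mem_pyRange_one.1 hj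
  by_cases h2j : 2 ≤ j
  · have : markedB (n+1) j = PySem.Set.contains ((PySem.List.pyRange 2 (n+1) 1).foldl
        (fun comp i => if PySem.Set.contains comp i = false then
          PySem.Set.update comp (PySem.List.pyRange (i*i) (n+1) i)
        else comp) PySem.Set.empty) j := by
      rw [Bool.eq_iff_iff, markedB_iff, PySem.Set.contains_iff,
        B_inv n (n+1) (by omega) (le_refl _) j]
      exact Marked_iff_InComp n j (by omega) (by omega)
    simp [refEntry, this]
  · simp [refEntry, h2j]


-- ===== VERDICT (by name: the statement is the Claim_ definition above) =====
theorem generate_prime_list_spec : Claim_equal_generate_prime_list :=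
  fun n _ hn => by
    unfold Pre_generate_prime_list at hn
    unfold Spec_generate_prime_list
    rw [a_eq n hn, b_eq n hn]
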